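-- pv_equiv track=rewrite | github.com/Tarun08091997/GoKhana_item_count_predictor | src/util/filter_utils.py | should_process_item
-- ===== SOURCE A (Python) =====
-- from typing import Optional, Set, Tuple
--
-- def should_process_item(
--     foodcourt_id: str,
--     restaurant_id: str,
--     item_name: str,
--     filter_set: Optional[Set[Tuple[str, str, str]]]
-- ) -> bool:
--     """
--     Check if an item should be processed based on the filter set.
--     If filter_set is None, process all items.
--
--     Args:
--         foodcourt_id: Foodcourt ID
--         restaurant_id: Restaurant ID
--         item_name: Item name
--         filter_set: Set of tuples (foodcourt_id, restaurant_id, item_name) or None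
--
--     Returns:
--         True if item should be processed, False otherwise
--     """
--     if filter_set is None:
--         return True
--
--     # Normalize for matching (strip and convert to string, case-insensitive for item name)
--     fc_id = str(foodcourt_id).strip()
--     rest_id = str(restaurant_id).strip()
--     item = str(item_name).strip()
--
--     # Check exact match first
--     if (fc_id, rest_id, item) in filter_set:
--         return True
--
--     # Also check case-insensitive match for item name
--     for filter_fc, filter_rest, filter_item in filter_set:
--         if (fc_id == filter_fc and
--             rest_id == filter_rest and
--             item.lower() == filter_item.lower()):
--             return True
--
--     return False
-- ===== SOURCE B (Python) =====
-- def should_process_item(foodcourt_id, restaurant_id, item_name, filter_set):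
--     if filter_set is None:
--         return True
--     # Stage 1: group the filters into a two-level index
--     #   (foodcourt_id, restaurant_id) -> set of lowercased item names.
--     # Stage 2: one lookup in the group, one membership test on the item.
--     # The exact-match check of A is subsumed by the case-insensitive one.
--     index = {}
--     for f, r, i in filter_set:
--         index.setdefault((f, r), set()).add(i.lower())
--     group = index.get((str(foodcourt_id).strip(), str(restaurant_id).strip()), set())
--     return str(item_name).strip().lower() in group
-- ===== Notes on version B (the rewrite author's own statement) =====
-- stated objective: alternative
-- what changed: Replaces A's exact-match membership test plus case-insensitive linear scan by a grouped two-level index (a dict mapping (foodcourt,restaurant) pairs to the set of lowercased item names) built in one pass, followed by a single group lookup and item-membership test; the exact match is subsumed by the case-insensitive one.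
import Mathlib
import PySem

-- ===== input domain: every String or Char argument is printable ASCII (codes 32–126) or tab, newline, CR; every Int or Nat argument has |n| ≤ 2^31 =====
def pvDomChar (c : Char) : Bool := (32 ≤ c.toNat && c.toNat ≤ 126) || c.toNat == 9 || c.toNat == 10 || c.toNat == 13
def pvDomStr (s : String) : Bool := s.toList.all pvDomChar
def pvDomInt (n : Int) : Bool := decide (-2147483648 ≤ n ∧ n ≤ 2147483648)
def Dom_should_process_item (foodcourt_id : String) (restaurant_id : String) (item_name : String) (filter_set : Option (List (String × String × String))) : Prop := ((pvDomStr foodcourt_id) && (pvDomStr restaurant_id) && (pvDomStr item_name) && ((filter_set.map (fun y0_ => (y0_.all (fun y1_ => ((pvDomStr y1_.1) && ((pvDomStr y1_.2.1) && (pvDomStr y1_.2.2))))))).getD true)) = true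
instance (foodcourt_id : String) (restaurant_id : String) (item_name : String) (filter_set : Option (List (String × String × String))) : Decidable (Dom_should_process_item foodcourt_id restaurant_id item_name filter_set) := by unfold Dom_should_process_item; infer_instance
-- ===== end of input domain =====

-- ===== PORT A =====
-- B replaces A's exact-match test + case-insensitive scan by a grouped two-level
-- index ((fc,rest) -> set of lowered item names) built once, then one lookup
-- (alternative decomposition; same cost).
-- A's for-loop over the filter set with early 'return True' (order-independent: an any-test)
def spiLoopA (fc rest item : String) : List (String × String × String) → Bool
  | [] => false
  | (ffc, frest, fitem) :: t =>
      if fc == ffc && rest == frest && PySem.Str.lower item == PySem.Str.lower fitem then true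
      else spiLoopA fc rest item t

def should_process_item (foodcourt_id : String) (restaurant_id : String) (item_name : String) (filter_set : Option (List (String × String × String))) : Bool :=
  match filter_set with
  | none => true
  | some s =>
    let fc_id := PySem.Str.strip foodcourt_id
    let rest_id := PySem.Str.strip restaurant_id
    let item := PySem.Str.strip item_name
    if s.contains (fc_id, rest_id, item) then true
    else spiLoopA fc_id rest_id item s

-- ===== PORT B =====
-- index.setdefault((f, r), set()).add(i.lower())  =  modify at key (f, r) with default ∅, adding lower i
def should_process_item_alt (foodcourt_id : String) (restaurant_id : String) (item_name : String) (filter_set : Option (List (String × String × String))) : Bool :=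
  match filter_set with
  | none => true
  | some s =>
    let index : PySem.Dict (String × String) (PySem.Set String) :=
      s.foldl (fun d t =>
        d.modify (t.1, t.2.1) PySem.Set.empty (fun g => PySem.Set.add g (PySem.Str.lower t.2.2)))
        PySem.Dict.empty
    let group := index.getD (PySem.Str.strip foodcourt_id, PySem.Str.strip restaurant_id) PySem.Set.empty
    PySem.Set.contains group (PySem.Str.lower (PySem.Str.strip item_name))

-- ===== PRECONDITION & SPEC =====
def Spec_should_process_item (foodcourt_id : String) (restaurant_id : String) (item_name : String) (filter_set : Option (List (String × String × String))) (out : Bool) : Prop := out = should_process_item_alt foodcourt_id restaurant_id item_name filter_set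
instance (foodcourt_id : String) (restaurant_id : String) (item_name : String) (filter_set : Option (List (String × String × String))) (out : Bool) : Decidable (Spec_should_process_item foodcourt_id restaurant_id item_name filter_set out) := by unfold Spec_should_process_item; infer_instance

-- ===== CLAIM (what is proved, stated in full; the proofs are below) =====
def Claim_equal_should_process_item : Prop := ∀ (foodcourt_id : String) (restaurant_id : String) (item_name : String) (filter_set : Option (List (String × String × String))), Dom_should_process_item foodcourt_id restaurant_id item_name filter_set → Spec_should_process_item foodcourt_id restaurant_id item_name filter_set (should_process_item foodcourt_id restaurant_id item_name filter_set)

-- ===== LEMMAS AND PROOFS =====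

-- A's loop is an any-test
lemma spiLoopA_eq_any (fc rest item : String) (s : List (String × String × String)) :
    spiLoopA fc rest item s =
      s.any (fun t => fc == t.1 && rest == t.2.1 && PySem.Str.lower item == PySem.Str.lower t.2.2) := by
  induction s with
  | nil => rfl
  | cons h t ih =>
    obtain ⟨f, r, i⟩ := h
    simp only [spiLoopA, List.any_cons, ← ih]
    split_ifs with hc <;> simp [hc]

-- what B's grouped index answers: membership of c in the group at key k
lemma fold_index_lookup (s : List (String × String × String))
    (d : PySem.Dict (String × String) (PySem.Set String)) (k : String × String) (c : String) :
    PySem.Set.contains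
      ((s.foldl (fun d t =>
          d.modify (t.1, t.2.1) PySem.Set.empty (fun g => PySem.Set.add g (PySem.Str.lower t.2.2))) d).getD k PySem.Set.empty) c
      = (PySem.Set.contains (d.getD k PySem.Set.empty) c
          || s.any (fun t => (t.1, t.2.1) == k && PySem.Str.lower t.2.2 == c)) := by
  induction s generalizing d with
  | nil => simp
  | cons h t ih =>
    obtain ⟨f, r, i⟩ := h
    simp only [List.foldl_cons, List.any_cons, ih]
    rw [PySem.Dict.getD_modify]
    by_cases hk : k = (f, r)
    · subst hk
      rw [if_pos rfl, Bool.eq_iff_iff]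
      simp only [beq_self_eq_true, Bool.true_and, Bool.or_eq_true,
        PySem.Set.contains_iff, PySem.Set.mem_add, beq_iff_eq]
      tauto
    · rw [if_neg hk]
      have hne : ((f, r) == k) = false := by simp [Ne.symm hk]
      simp [hne]

-- A's branch structure collapses to the single any-test B answers
lemma spi_eq (a b c : String) (s : List (String × String × String)) :
    (if s.contains (a, b, c) then true else spiLoopA a b c s)
      = s.any (fun t => (t.1, t.2.1) == (a, b) && PySem.Str.lower t.2.2 == PySem.Str.lower c) := by
  have hanys : (s.any (fun t => (t.1, t.2.1) == (a, b) && PySem.Str.lower t.2.2 == PySem.Str.lower c))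
      = s.any (fun t => a == t.1 && b == t.2.1 && PySem.Str.lower c == PySem.Str.lower t.2.2) := by
    rw [Bool.eq_iff_iff]
    simp only [List.any_eq_true]
    constructor <;> rintro ⟨⟨f, r, i⟩, hm, h⟩ <;> exact ⟨(f, r, i), hm, by simp_all⟩
  rw [hanys, spiLoopA_eq_any]
  by_cases hc : s.contains (a, b, c) = true
  · rw [if_pos hc]
    exact (List.any_eq_true.mpr ⟨_, List.contains_iff_mem.mp hc, by simp⟩).symm
  · rw [if_neg hc]

theorem should_process_item_spec : Claim_equal_should_process_item := by
  intro fc rest item fs _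
  unfold Spec_should_process_item should_process_item should_process_item_alt
  cases fs with
  | none => rfl
  | some s =>
    dsimp only
    rw [fold_index_lookup]
    simp only [PySem.Dict.empty, PySem.Dict.getD, PySem.Dict.get?]
    rw [spi_eq]
    simp [PySem.Set.contains, PySem.Set.empty]
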